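-- pv_equiv track=rewrite | github.com/cce2955/TvCGUI-Main | bonezone testing/bonezonetoolkit.py | cluster_records
-- ===== SOURCE A (Python) =====
-- CLUSTER_GAP  = 0x200
--
-- def cluster_records(records):
--     if not records: return []
--     records = sorted(records)
--     clusters, current = [], [records[0]]
--     for addr in records[1:]:
--         if addr - current[-1] <= CLUSTER_GAP: current.append(addr)
--         else: clusters.append(current); current = [addr]
--     clusters.append(current)
--     return clusters
-- ===== SOURCE B (Python) =====
-- CLUSTER_GAP = 0x200
--
-- def cluster_records(records):
--     # Scan indices for gap boundaries and emit slices, instead of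
--     # accumulating the current group element by element.
--     if not records: return []
--     records = sorted(records)
--     clusters = []
--     start = 0
--     for i in range(1, len(records)):
--         if records[i] - records[i - 1] > CLUSTER_GAP:
--             clusters.append(records[start:i])
--             start = i
--     clusters.append(records[start:])
--     return clusters
-- ===== Notes on version B (the rewrite author's own statement) =====
-- stated objective: alternative
-- what changed: B replaces A's fused accumulate-and-emit loop (growing a 'current' group element by element and comparing addr with current[-1]) by an index scan that compares adjacent sorted records to find gap boundaries and emits each cluster as a slice records[start:i].
import Mathlib
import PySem

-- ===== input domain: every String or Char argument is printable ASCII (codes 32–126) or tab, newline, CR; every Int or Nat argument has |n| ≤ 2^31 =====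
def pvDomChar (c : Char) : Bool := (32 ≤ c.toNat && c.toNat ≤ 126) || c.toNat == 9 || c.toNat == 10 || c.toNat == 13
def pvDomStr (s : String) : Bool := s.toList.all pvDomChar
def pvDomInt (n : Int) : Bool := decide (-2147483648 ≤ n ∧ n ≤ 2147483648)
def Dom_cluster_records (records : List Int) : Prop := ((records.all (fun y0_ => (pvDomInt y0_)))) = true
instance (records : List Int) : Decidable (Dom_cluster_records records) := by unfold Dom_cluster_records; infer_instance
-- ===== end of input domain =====

-- B finds cluster boundaries by an index scan over adjacent sorted records and emits slices,
-- instead of A's accumulate-and-emit loop over the elements themselves; same cost, alternative decomposition.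

-- ===== PORT A =====
-- A's loop body: compare addr with current[-1] (current is never empty, so the .getD 0
-- default is never used), then extend `current` or emit it and start a new one.
def cluster_records_astep (st : List (List Int) × List Int) (addr : Int) :
    List (List Int) × List Int :=
  if addr - (PySem.List.pyGet? st.2 (-1)).getD 0 ≤ 512 then (st.1, st.2 ++ [addr])
  else (st.1 ++ [st.2], [addr])

def cluster_records (records : List Int) : List (List Int) :=
  if records = [] then []
  else
    match PySem.List.sorted records (fun x => x) false with
    | [] => []   -- unreachable: sorted of a nonempty list is nonempty
    | h :: t =>
      let st := t.foldl cluster_records_astep ([], [h])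
      st.1 ++ [st.2]

-- ===== PORT B =====
-- B's loop body: at index i compare records[i] with records[i-1] (both always in range, so
-- the .getD 0 defaults are never used); on a gap emit the slice records[start:i] and move start.
def cluster_records_bstep (s : List Int) (st : List (List Int) × Int) (i : Int) :
    List (List Int) × Int :=
  if (PySem.List.pyGet? s i).getD 0 - (PySem.List.pyGet? s (i - 1)).getD 0 > 512 then
    (st.1 ++ [PySem.List.slice s (some st.2) (some i)], i)
  else st

def cluster_records_alt (records : List Int) : List (List Int) :=
  if records = [] then []
  else
    let s := PySem.List.sorted records (fun x => x) false
    let st := (PySem.List.pyRange 1 (s.length : Int) 1).foldl (cluster_records_bstep s) ([], 0)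
    st.1 ++ [PySem.List.slice s (some st.2) none]

-- ===== PRECONDITION & SPEC =====
def Spec_cluster_records (records : List Int) (out : List (List Int)) : Prop := out = cluster_records_alt records
instance (records : List Int) (out : List (List Int)) : Decidable (Spec_cluster_records records out) := by unfold Spec_cluster_records; infer_instance

-- ===== CLAIM (what is proved, stated in full; the proofs are below) =====
def Claim_equal_cluster_records : Prop := ∀ (records : List Int), Dom_cluster_records records → Spec_cluster_records records (cluster_records records)

-- ===== LEMMAS AND PROOFS =====

/-- The pending group of A's loop: the slice s[start:j]. -/
def pvCur (s : List Int) (start j : Nat) : List Int := (s.drop start).take (j - start)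

theorem pvCur_getLast? (s : List Int) (start j : Nat)
    (h1 : start < j) (h2 : j ≤ s.length) :
    (pvCur s start j).getLast? = s[j - 1]? := by
  have hlen : (pvCur s start j).length = j - start := by
    simp [pvCur]; omega
  rw [List.getLast?_eq_getElem?, hlen]
  unfold pvCur
  rw [List.getElem?_take_of_lt (by omega), List.getElem?_drop]
  congr 1
  omega

theorem pvCur_extend (s : List Int) (start j : Nat)
    (h1 : start ≤ j) (h2 : j < s.length) :
    pvCur s start j ++ [s[j]] = pvCur s start (j + 1) := by
  unfold pvCur
  have : j + 1 - start = (j - start) + 1 := by omega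
  rw [this, List.take_add_one, List.getElem?_drop, List.getElem?_eq_getElem (by omega)]
  congr 3
  omega

theorem pvCur_single (s : List Int) (j : Nat) (h : j < s.length) :
    pvCur s j (j + 1) = [s[j]] := by
  unfold pvCur
  have h1 : j + 1 - j = 1 := by omega
  rw [h1, List.drop_eq_getElem_cons h]
  rfl

/-- Joint loop invariant: A's element loop and B's index loop, run from position j with
    pending group s[start:j], finish to the same cluster list. -/
theorem pv_loop (s : List Int) (m : Nat) : ∀ (j start : Nat) (cs : List (List Int)),
    j + m = s.length → start < j →
    ((s.drop j).foldl cluster_records_astep (cs, pvCur s start j)).1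
      ++ [((s.drop j).foldl cluster_records_astep (cs, pvCur s start j)).2]
    = ((PySem.List.pyRange (j : Int) (s.length : Int) 1).foldl (cluster_records_bstep s)
          (cs, (start : Int))).1
      ++ [PySem.List.slice s
          (some ((PySem.List.pyRange (j : Int) (s.length : Int) 1).foldl (cluster_records_bstep s)
            (cs, (start : Int))).2) none] := by
  induction m with
  | zero =>
    intro j start cs hjm hsj
    have hj : j = s.length := by omega
    subst hj
    rw [List.drop_length, PySem.List.pyRange_one_eq_nil (le_refl _)]
    simp only [List.foldl_nil]
    rw [PySem.List.slice_from_natCast]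
    unfold pvCur
    rw [List.take_of_length_le (by simp)]
  | succ m ih =>
    intro j start cs hjm hsj
    have hjn : j < s.length := by omega
    have hj1 : 1 ≤ j := by omega
    -- peel one element off A's loop and one index off B's loop
    rw [List.drop_eq_getElem_cons hjn, List.foldl_cons,
        PySem.List.pyRange_one_cons (by exact_mod_cast hjn), List.foldl_cons]
    -- reduce A's step
    have hA : cluster_records_astep (cs, pvCur s start j) s[j]
        = if s[j] - s[j - 1]'(by omega) ≤ 512 then (cs, pvCur s start j ++ [s[j]])
          else (cs ++ [pvCur s start j], [s[j]]) := by
      unfold cluster_records_astep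
      rw [PySem.List.pyGet?_neg_one, pvCur_getLast? s start j hsj (by omega),
          List.getElem?_eq_getElem (show j - 1 < s.length by omega)]
      rfl
    -- reduce B's step
    have hB : cluster_records_bstep s (cs, (start : Int)) (j : Int)
        = if s[j] - s[j - 1]'(by omega) ≤ 512 then (cs, (start : Int))
          else (cs ++ [PySem.List.slice s (some (start : Int)) (some (j : Int))], (j : Int)) := by
      unfold cluster_records_bstep
      have hc : ((j : Int) - 1) = ((j - 1 : Nat) : Int) := by omega
      rw [hc]
      simp only [PySem.List.pyGet?_natCast,
        List.getElem?_eq_getElem hjn, List.getElem?_eq_getElem (show j - 1 < s.length by omega),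
        Option.getD_some]
      split_ifs
      all_goals first | rfl | omega
    rw [hA, hB]
    by_cases hgap : s[j] - s[j - 1]'(by omega) ≤ 512
    · rw [if_pos hgap, if_pos hgap, pvCur_extend s start j (by omega) hjn]
      have := ih (j + 1) start cs (by omega) (by omega)
      simpa using this
    · rw [if_neg hgap, if_neg hgap, PySem.List.slice_natCast]
      have := ih (j + 1) j (cs ++ [pvCur s start j]) (by omega) (by omega)
      rw [pvCur_single s j hjn] at this
      simpa [pvCur] using this

-- ===== VERDICT (by name: the statement is the Claim_ definition above) =====
theorem cluster_records_spec : Claim_equal_cluster_records := by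
  intro records _
  unfold Spec_cluster_records cluster_records cluster_records_alt
  by_cases hr : records = []
  · simp [hr]
  · rw [if_neg hr, if_neg hr]
    cases hs : PySem.List.sorted records (fun x => x) false with
    | nil =>
      exfalso
      have := PySem.List.length_sorted (xs := records) (key := fun x => x) (rev := false)
      rw [hs] at this
      exact hr (List.eq_nil_of_length_eq_zero this.symm)
    | cons h t =>
      have hcur : pvCur (h :: t) 0 1 = [h] := by simp [pvCur]
      have hdrop : (h :: t).drop 1 = t := rfl
      have := pv_loop (h :: t) t.length 1 0 [] (by simp; omega) (by omega)
      rw [hcur, hdrop] at this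
      simpa using this
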